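-- pv_equiv track=rewrite | github.com/eliottcassidy2000/math | 04-computation/omega4_5cycle.py | omega4_local
-- ===== SOURCE A (Python) =====
-- from itertools import combinations, permutations
--
-- def omega4_local(A):
--     count = 0
--     for perm in permutations(range(5)):
--         v0, v1, v2, v3, v4 = perm
--         if (A[v0][v1] and A[v1][v2] and A[v2][v3] and A[v3][v4] and
--             A[v0][v2] and A[v1][v3] and A[v2][v4]):
--             count += 1
--     return count
-- ===== SOURCE B (Python) =====
-- def omega4_local(A):
--     # Count each embedding by its central triangle (v1,v2,v3): the pattern's middle
--     # three vertices are mutually adjacent, and the two end vertices are not searched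
--     # for but computed as the complement of the triangle in {0..4} and assigned to the
--     # ends in the two possible orders.
--     total = 0
--     for v1 in range(5):
--         for v2 in range(5):
--             for v3 in range(5):
--                 if (v2 != v1 and v3 != v1 and v3 != v2 and
--                         A[v1][v2] and A[v2][v3] and A[v1][v3]):
--                     a, b = [x for x in range(5) if x != v1 and x != v2 and x != v3]
--                     for v0, v4 in ((a, b), (b, a)):
--                         if A[v0][v1] and A[v0][v2] and A[v3][v4] and A[v2][v4]:
--                             total += 1
--     return total
-- ===== Notes on version B (the rewrite author's own statement) =====
-- stated objective: alternative
-- what changed: Instead of filtering all 120 permutations against all seven edges, B counts each embedding by its central triangle: it iterates only over ordered mutually-adjacent triples (v1,v2,v3), computes the two remaining vertices as the set complement of the triple in {0..4}, and tests their two possible assignments to the ends v0,v4.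
import Mathlib
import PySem

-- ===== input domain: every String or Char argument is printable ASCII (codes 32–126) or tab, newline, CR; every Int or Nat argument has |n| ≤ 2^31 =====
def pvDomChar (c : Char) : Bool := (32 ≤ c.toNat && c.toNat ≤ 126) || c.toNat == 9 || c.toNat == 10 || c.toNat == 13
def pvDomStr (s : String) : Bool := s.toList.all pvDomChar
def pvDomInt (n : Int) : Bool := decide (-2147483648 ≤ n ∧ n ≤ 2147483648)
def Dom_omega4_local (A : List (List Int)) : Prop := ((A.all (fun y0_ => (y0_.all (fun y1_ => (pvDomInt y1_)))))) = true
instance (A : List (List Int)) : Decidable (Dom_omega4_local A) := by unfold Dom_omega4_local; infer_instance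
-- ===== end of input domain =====

-- B counts each embedding by its central triangle instead of filtering the 120
-- permutations: iterate ordered mutually-adjacent triples (v1,v2,v3), compute the two
-- remaining vertices as the complement of the triple in {0..4}, and test their two
-- possible assignments to the ends v0,v4 (objective: alternative).

-- ===== PORT A =====
-- A[i][j]: exact on Pre_ (indices 0..4 are in range there); getD defaults are never
-- reached inside Pre_ (Python raises IndexError outside, excluded by Pre_).
def pvEntry (A : List (List Int)) (i j : Int) : Int :=
  (PySem.List.pyGet? ((PySem.List.pyGet? A i).getD []) j).getD 0

-- the 7-edge truthiness test of A's `if`, on an unpacked permutation tuple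
def pvCondA (A : List (List Int)) (p : List Int) : Bool :=
  match p with
  | [v0, v1, v2, v3, v4] =>
      pvEntry A v0 v1 != 0 && pvEntry A v1 v2 != 0 && pvEntry A v2 v3 != 0 &&
      pvEntry A v3 v4 != 0 && pvEntry A v0 v2 != 0 && pvEntry A v1 v3 != 0 &&
      pvEntry A v2 v4 != 0
  | _ => false

-- itertools.permutations(range(5)) ported as List.permutations of [0,1,2,3,4]
-- (enumeration order differs; only the resulting count is used).
def omega4_local (A : List (List Int)) : Int :=
  (([0, 1, 2, 3, 4] : List Int).permutations).foldl
    (fun count perm => if pvCondA A perm then count + 1 else count) 0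

-- ===== PORT B =====
-- literal port of Source B: three nested `for v in range(5)` loops over the central triple,
-- the complement comprehension `[x for x in range(5) if x != v1 and x != v2 and x != v3]`
-- as a filter, Python's `a, b = …` unpacking as a match on [a, b] (under the distinctness
-- guard the filter always has exactly two elements, so the catch-all branch is unreachable),
-- then the loop over the two end assignments.
def omega4_local_alt (A : List (List Int)) : Int :=
  (PySem.List.pyRange 0 5 1).foldl (fun t1 v1 =>
    (PySem.List.pyRange 0 5 1).foldl (fun t2 v2 =>
      (PySem.List.pyRange 0 5 1).foldl (fun t3 v3 =>
        if v2 ≠ v1 ∧ v3 ≠ v1 ∧ v3 ≠ v2 ∧ pvEntry A v1 v2 ≠ 0 ∧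
            pvEntry A v2 v3 ≠ 0 ∧ pvEntry A v1 v3 ≠ 0 then
          match (PySem.List.pyRange 0 5 1).filter
              (fun x => decide (x ≠ v1) && decide (x ≠ v2) && decide (x ≠ v3)) with
          | [a, b] =>
            ([(a, b), (b, a)] : List (Int × Int)).foldl (fun t p =>
              if pvEntry A p.1 v1 ≠ 0 ∧ pvEntry A p.1 v2 ≠ 0 ∧
                  pvEntry A v3 p.2 ≠ 0 ∧ pvEntry A v2 p.2 ≠ 0 then t + 1 else t) t3
          | _ => t3
        else t3) t2) t1) 0

-- ===== PRECONDITION & SPEC =====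
-- Python A evaluates A[i][j] for every ordered pair of distinct i,j in 0..4 (the first
-- conjunct A[v0][v1] is never short-circuited), so it raises IndexError exactly unless
-- rows 0..3 exist with length ≥ 5 and row 4 exists with length ≥ 4 (column 4 of row 4,
-- the diagonal entry, is never read).
def Pre_omega4_local (A : List (List Int)) : Prop :=
  5 ≤ A.length ∧ 5 ≤ (A.getD 0 []).length ∧ 5 ≤ (A.getD 1 []).length ∧
  5 ≤ (A.getD 2 []).length ∧ 5 ≤ (A.getD 3 []).length ∧ 4 ≤ (A.getD 4 []).length
instance (A : List (List Int)) : Decidable (Pre_omega4_local A) := by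
  unfold Pre_omega4_local; infer_instance

def pvWitness_omega4_local : List (List Int) :=
  [[0, 1, 1, 0, 1], [1, 0, 1, 1, 0], [0, 1, 0, 1, 1], [1, 0, 1, 0, 1], [1, 1, 0, 1, 0]]

def Spec_omega4_local (A : List (List Int)) (out : Int) : Prop := out = omega4_local_alt A
instance (A : List (List Int)) (out : Int) : Decidable (Spec_omega4_local A out) := by unfold Spec_omega4_local; infer_instance

-- ===== CLAIM (what is proved, stated in full; the proofs are below) =====
def Claim_equal_omega4_local : Prop := ∀ (A : List (List Int)), Dom_omega4_local A → Pre_omega4_local A → Spec_omega4_local A (omega4_local A)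

-- ===== LEMMAS AND PROOFS =====

lemma pvR5 : PySem.List.pyRange 0 5 1 = ([0, 1, 2, 3, 4] : List Int) := by decide

lemma pvMem_ite_nil {beta : Type} {c : Prop} [Decidable c] {l : List beta} {x : beta} :
    x ∈ (if c then l else []) ↔ c ∧ x ∈ l := by
  split <;> simp_all

-- counting foldl = length of the filtered list
lemma pvFoldl_count (q : List Int → Bool) (l : List (List Int)) (n : Int) :
    l.foldl (fun c p => if q p then c + 1 else c) n = n + ((l.filter q).length : Int) := by
  induction l generalizing n with
  | nil => simp
  | cons h t ih =>
    by_cases hq : q h = true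
    · simp [hq, ih]
      ring
    · simp [hq, ih]

-- an Int-accumulating foldl whose step adds the length of g x equals length of the flatMap
lemma pvFoldLen {alpha beta : Type} (l : List alpha) (g : alpha → List beta) (step : Int → alpha → Int)
    (h : ∀ t x, step t x = t + ((g x).length : Int)) (t : Int) :
    l.foldl step t = t + ((l.flatMap g).length : Int) := by
  induction l generalizing t with
  | nil => simp
  | cons x xs ih =>
    rw [List.foldl_cons, ih, h, List.flatMap_cons, List.length_append]
    push_cast
    ring

-- proof-only names for the levels of B's nested loops, as flatMaps producing tuples
def pvT3 (A : List (List Int)) (v1 v2 v3 : Int) : List (List Int) :=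
  if v2 ≠ v1 ∧ v3 ≠ v1 ∧ v3 ≠ v2 ∧ pvEntry A v1 v2 ≠ 0 ∧
      pvEntry A v2 v3 ≠ 0 ∧ pvEntry A v1 v3 ≠ 0 then
    match ([0, 1, 2, 3, 4] : List Int).filter
        (fun x => decide (x ≠ v1) && decide (x ≠ v2) && decide (x ≠ v3)) with
    | [a, b] =>
      ([(a, b), (b, a)] : List (Int × Int)).flatMap fun p =>
        if pvEntry A p.1 v1 ≠ 0 ∧ pvEntry A p.1 v2 ≠ 0 ∧
            pvEntry A v3 p.2 ≠ 0 ∧ pvEntry A v2 p.2 ≠ 0 then [[p.1, v1, v2, v3, p.2]] else []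
    | _ => []
  else []

def pvT2 (A : List (List Int)) (v1 v2 : Int) : List (List Int) :=
  ([0, 1, 2, 3, 4] : List Int).flatMap (pvT3 A v1 v2)

def pvT1 (A : List (List Int)) (v1 : Int) : List (List Int) :=
  ([0, 1, 2, 3, 4] : List Int).flatMap (pvT2 A v1)

def pvT (A : List (List Int)) : List (List Int) :=
  ([0, 1, 2, 3, 4] : List Int).flatMap (pvT1 A)

lemma pvAlt_eq (A : List (List Int)) : omega4_local_alt A = ((pvT A).length : Int) := by
  unfold omega4_local_alt
  rw [pvR5]
  have h3 : ∀ (v1 v2 : Int) (t v3 : Int),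
      (if v2 ≠ v1 ∧ v3 ≠ v1 ∧ v3 ≠ v2 ∧ pvEntry A v1 v2 ≠ 0 ∧
          pvEntry A v2 v3 ≠ 0 ∧ pvEntry A v1 v3 ≠ 0 then
        match ([0, 1, 2, 3, 4] : List Int).filter
            (fun x => decide (x ≠ v1) && decide (x ≠ v2) && decide (x ≠ v3)) with
        | [a, b] =>
          ([(a, b), (b, a)] : List (Int × Int)).foldl (fun t p =>
            if pvEntry A p.1 v1 ≠ 0 ∧ pvEntry A p.1 v2 ≠ 0 ∧
                pvEntry A v3 p.2 ≠ 0 ∧ pvEntry A v2 p.2 ≠ 0 then t + 1 else t) t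
        | _ => t
      else t) = t + ((pvT3 A v1 v2 v3).length : Int) := by
    intro v1 v2 t v3
    unfold pvT3
    split
    · rcases hfe : ([0, 1, 2, 3, 4] : List Int).filter
          (fun x => decide (x ≠ v1) && decide (x ≠ v2) && decide (x ≠ v3)) with
        _ | ⟨a, _ | ⟨b, _ | ⟨c, l⟩⟩⟩
      · simp
      · simp
      · exact pvFoldLen _ (fun (p : Int × Int) => if pvEntry A p.1 v1 ≠ 0 ∧ pvEntry A p.1 v2 ≠ 0 ∧
            pvEntry A v3 p.2 ≠ 0 ∧ pvEntry A v2 p.2 ≠ 0 then [[p.1, v1, v2, v3, p.2]] else [])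
          _ (fun (t : Int) (p : Int × Int) => by split <;> rename_i hc <;> simp [hc]) t
      · simp
    · simp
  have h2 : ∀ (v1 : Int) (t v2 : Int),
      (([0, 1, 2, 3, 4] : List Int).foldl (fun t3 v3 =>
        if v2 ≠ v1 ∧ v3 ≠ v1 ∧ v3 ≠ v2 ∧ pvEntry A v1 v2 ≠ 0 ∧
            pvEntry A v2 v3 ≠ 0 ∧ pvEntry A v1 v3 ≠ 0 then
          match ([0, 1, 2, 3, 4] : List Int).filter
              (fun x => decide (x ≠ v1) && decide (x ≠ v2) && decide (x ≠ v3)) with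
          | [a, b] =>
            ([(a, b), (b, a)] : List (Int × Int)).foldl (fun t p =>
              if pvEntry A p.1 v1 ≠ 0 ∧ pvEntry A p.1 v2 ≠ 0 ∧
                  pvEntry A v3 p.2 ≠ 0 ∧ pvEntry A v2 p.2 ≠ 0 then t + 1 else t) t3
          | _ => t3
        else t3) t) = t + ((pvT2 A v1 v2).length : Int) := by
    intro v1 t v2
    exact pvFoldLen _ (pvT3 A v1 v2) _ (fun t v3 => h3 v1 v2 t v3) t
  have h1 : ∀ (t v1 : Int),
      (([0, 1, 2, 3, 4] : List Int).foldl (fun t2 v2 =>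
        ([0, 1, 2, 3, 4] : List Int).foldl (fun t3 v3 =>
          if v2 ≠ v1 ∧ v3 ≠ v1 ∧ v3 ≠ v2 ∧ pvEntry A v1 v2 ≠ 0 ∧
              pvEntry A v2 v3 ≠ 0 ∧ pvEntry A v1 v3 ≠ 0 then
            match ([0, 1, 2, 3, 4] : List Int).filter
                (fun x => decide (x ≠ v1) && decide (x ≠ v2) && decide (x ≠ v3)) with
            | [a, b] =>
              ([(a, b), (b, a)] : List (Int × Int)).foldl (fun t p =>
                if pvEntry A p.1 v1 ≠ 0 ∧ pvEntry A p.1 v2 ≠ 0 ∧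
                    pvEntry A v3 p.2 ≠ 0 ∧ pvEntry A v2 p.2 ≠ 0 then t + 1 else t) t3
            | _ => t3
          else t3) t2) t) = t + ((pvT1 A v1).length : Int) := by
    intro t v1
    exact pvFoldLen _ (pvT2 A v1) _ (fun t v2 => h2 v1 t v2) t
  rw [pvFoldLen _ (pvT1 A) _ (fun t v1 => h1 t v1) 0]
  simp [pvT]

-- the flat characterization both sides are matched against
def pvFlat (A : List (List Int)) (x : List Int) : Prop :=
  ∃ v0 v1 v2 v3 v4 : Int,
    x = [v0, v1, v2, v3, v4] ∧
    v0 ∈ ([0,1,2,3,4] : List Int) ∧ v1 ∈ ([0,1,2,3,4] : List Int) ∧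
    v2 ∈ ([0,1,2,3,4] : List Int) ∧ v3 ∈ ([0,1,2,3,4] : List Int) ∧
    v4 ∈ ([0,1,2,3,4] : List Int) ∧
    v1 ≠ v0 ∧ v2 ≠ v0 ∧ v2 ≠ v1 ∧ v3 ≠ v0 ∧ v3 ≠ v1 ∧ v3 ≠ v2 ∧
    v4 ≠ v0 ∧ v4 ≠ v1 ∧ v4 ≠ v2 ∧ v4 ≠ v3 ∧
    pvEntry A v0 v1 ≠ 0 ∧ pvEntry A v1 v2 ≠ 0 ∧ pvEntry A v2 v3 ≠ 0 ∧
    pvEntry A v3 v4 ≠ 0 ∧ pvEntry A v0 v2 ≠ 0 ∧ pvEntry A v1 v3 ≠ 0 ∧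
    pvEntry A v2 v4 ≠ 0

-- A's filtered permutations, characterized
lemma pvMemA (A : List (List Int)) (x : List Int) :
    x ∈ (([0, 1, 2, 3, 4] : List Int).permutations).filter (pvCondA A) ↔ pvFlat A x := by
  rw [List.mem_filter, List.mem_permutations]
  constructor
  · rintro ⟨hperm, hcond⟩
    have hlen : x.length = 5 := hperm.length_eq
    obtain ⟨v0, v1, v2, v3, v4, hx⟩ : ∃ v0 v1 v2 v3 v4 : Int, x = [v0, v1, v2, v3, v4] := by
      match x, hlen with
      | [a, b, c, d, e], _ => exact ⟨a, b, c, d, e, rfl⟩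
    subst hx
    have hmem : ∀ y, y ∈ ([v0, v1, v2, v3, v4] : List Int) → y ∈ ([0,1,2,3,4] : List Int) :=
      fun y hy => hperm.mem_iff.mp hy
    have hnd : ([v0, v1, v2, v3, v4] : List Int).Nodup := hperm.nodup_iff.mpr (by decide)
    simp only [List.nodup_cons, List.mem_cons, List.not_mem_nil, or_false,
      List.nodup_nil, and_true, not_or] at hnd
    simp only [pvCondA, Bool.and_eq_true, bne_iff_ne, ne_eq] at hcond
    exact ⟨v0, v1, v2, v3, v4, rfl, hmem v0 (by simp), hmem v1 (by simp), hmem v2 (by simp),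
      hmem v3 (by simp), hmem v4 (by simp),
      fun h => hnd.1.1 h.symm, fun h => hnd.1.2.1 h.symm, fun h => hnd.2.1.1 h.symm,
      fun h => hnd.1.2.2.1 h.symm, fun h => hnd.2.1.2.1 h.symm, fun h => hnd.2.2.1.1 h.symm,
      fun h => hnd.1.2.2.2 h.symm, fun h => hnd.2.1.2.2 h.symm, fun h => hnd.2.2.1.2 h.symm,
      fun h => hnd.2.2.2.1 h.symm,
      hcond.1.1.1.1.1.1, hcond.1.1.1.1.1.2, hcond.1.1.1.1.2, hcond.1.1.1.2,
      hcond.1.1.2, hcond.1.2, hcond.2⟩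
  · rintro ⟨v0, v1, v2, v3, v4, hx, h0, h1, h2, h3, h4,
      d10, d20, d21, d30, d31, d32, d40, d41, d42, d43, e01, e12, e23, e34, e02, e13, e24⟩
    subst hx
    constructor
    · have hnd : ([v0, v1, v2, v3, v4] : List Int).Nodup := by
        simp only [List.nodup_cons, List.mem_cons, List.not_mem_nil, or_false,
          List.nodup_nil, and_true, not_or]
        exact ⟨⟨fun h => d10 h.symm, fun h => d20 h.symm, fun h => d30 h.symm,
            fun h => d40 h.symm⟩,
          ⟨fun h => d21 h.symm, fun h => d31 h.symm, fun h => d41 h.symm⟩,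
          ⟨fun h => d32 h.symm, fun h => d42 h.symm⟩,
          fun h => d43 h.symm, fun h => h⟩
      have hsub : ([v0, v1, v2, v3, v4] : List Int) ⊆ ([0,1,2,3,4] : List Int) := by
        intro y hy
        simp only [List.mem_cons, List.not_mem_nil, or_false] at hy
        rcases hy with rfl | rfl | rfl | rfl | rfl
        · exact h0
        · exact h1
        · exact h2
        · exact h3
        · exact h4
      exact (List.subperm_of_subset hnd hsub).perm_of_length_le (by simp)
    · simp only [pvCondA, Bool.and_eq_true, bne_iff_ne, ne_eq]
      exact ⟨⟨⟨⟨⟨⟨e01, e12⟩, e23⟩, e34⟩, e02⟩, e13⟩, e24⟩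

-- removing three distinct members of {0..4} leaves exactly two
lemma pvCompLen (v1 v2 v3 : Int) (h1 : v1 ∈ ([0,1,2,3,4] : List Int))
    (h2 : v2 ∈ ([0,1,2,3,4] : List Int)) (h3 : v3 ∈ ([0,1,2,3,4] : List Int))
    (d21 : v2 ≠ v1) (d31 : v3 ≠ v1) (d32 : v3 ≠ v2) :
    (([0, 1, 2, 3, 4] : List Int).filter
      (fun x => decide (x ≠ v1) && decide (x ≠ v2) && decide (x ≠ v3))).length = 2 := by
  fin_cases h1 <;> fin_cases h2 <;> fin_cases h3 <;> first | (exfalso; omega) | decide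

lemma pvCompNodup (v1 v2 v3 : Int) :
    (([0, 1, 2, 3, 4] : List Int).filter
      (fun x => decide (x ≠ v1) && decide (x ≠ v2) && decide (x ≠ v3))).Nodup :=
  List.Nodup.filter _ (by decide)

-- B's tuple list, characterized
lemma pvMemB (A : List (List Int)) (x : List Int) : x ∈ pvT A ↔ pvFlat A x := by
  unfold pvT pvT1 pvT2
  simp only [List.mem_flatMap]
  constructor
  · rintro ⟨v1, h1, v2, h2, v3, h3, hx⟩
    unfold pvT3 at hx
    split at hx
    case isFalse => simp at hx
    case isTrue hg =>
      rcases hfe : ([0, 1, 2, 3, 4] : List Int).filter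
          (fun x => decide (x ≠ v1) && decide (x ≠ v2) && decide (x ≠ v3)) with
        _ | ⟨a, _ | ⟨b, _ | ⟨c, l⟩⟩⟩ <;> rw [hfe] at hx <;> simp only at hx
      · simp at hx
      · simp at hx
      · have ha : a ∈ ([0, 1, 2, 3, 4] : List Int).filter
            (fun x => decide (x ≠ v1) && decide (x ≠ v2) && decide (x ≠ v3)) := by
          rw [hfe]; simp
        have hb : b ∈ ([0, 1, 2, 3, 4] : List Int).filter
            (fun x => decide (x ≠ v1) && decide (x ≠ v2) && decide (x ≠ v3)) := by
          rw [hfe]; simp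
        rw [List.mem_filter] at ha hb
        simp only [Bool.and_eq_true, decide_eq_true_eq] at ha hb
        have hab : a ≠ b := by
          have := pvCompNodup v1 v2 v3
          rw [hfe] at this
          simp at this
          exact this
        simp only [List.mem_flatMap, List.mem_cons, List.not_mem_nil, or_false] at hx
        obtain ⟨p, hp, hx⟩ := hx
        rw [pvMem_ite_nil] at hx
        obtain ⟨hend, hx⟩ := hx
        simp only [List.mem_singleton] at hx
        obtain ⟨hg1, hg2, hg3, hg4, hg5, hg6⟩ := hg
        rcases hp with rfl | rfl
        · exact ⟨a, v1, v2, v3, b, hx, ha.1, h1, h2, h3, hb.1,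
            fun h => ha.2.1.1 h.symm, fun h => ha.2.1.2 h.symm, hg1,
            fun h => ha.2.2 h.symm, hg2, hg3,
            fun h => hab h.symm, hb.2.1.1, hb.2.1.2, hb.2.2,
            hend.1, hg4, hg5, hend.2.2.1, hend.2.1, hg6, hend.2.2.2⟩
        · exact ⟨b, v1, v2, v3, a, hx, hb.1, h1, h2, h3, ha.1,
            fun h => hb.2.1.1 h.symm, fun h => hb.2.1.2 h.symm, hg1,
            fun h => hb.2.2 h.symm, hg2, hg3,
            hab, ha.2.1.1, ha.2.1.2, ha.2.2,
            hend.1, hg4, hg5, hend.2.2.1, hend.2.1, hg6, hend.2.2.2⟩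
      · simp at hx
  · rintro ⟨v0, v1, v2, v3, v4, hx, h0, h1, h2, h3, h4,
      d10, d20, d21, d30, d31, d32, d40, d41, d42, d43, e01, e12, e23, e34, e02, e13, e24⟩
    refine ⟨v1, h1, v2, h2, v3, h3, ?_⟩
    unfold pvT3
    rw [if_pos ⟨d21, d31, d32, e12, e23, e13⟩]
    obtain ⟨a, b, hfe⟩ := List.length_eq_two.mp (pvCompLen v1 v2 v3 h1 h2 h3 d21 d31 d32)
    rw [hfe]
    have h0f : v0 ∈ ([a, b] : List Int) := by
      rw [← hfe, List.mem_filter]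
      simp only [Bool.and_eq_true, decide_eq_true_eq]
      exact ⟨h0, ⟨fun h => d10 h.symm, fun h => d20 h.symm⟩, fun h => d30 h.symm⟩
    have h4f : v4 ∈ ([a, b] : List Int) := by
      rw [← hfe, List.mem_filter]
      simp only [Bool.and_eq_true, decide_eq_true_eq]
      exact ⟨h4, ⟨d41, d42⟩, d43⟩
    simp only [List.mem_cons, List.not_mem_nil, or_false] at h0f h4f
    simp only [List.mem_flatMap, List.mem_cons, List.not_mem_nil, or_false]
    rcases h0f with rfl | rfl
    · rcases h4f with rfl | rfl
      · exact absurd rfl d40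
      · exact ⟨(v0, v4), Or.inl rfl, by rw [pvMem_ite_nil]; exact ⟨⟨e01, e02, e34, e24⟩, by simp [hx]⟩⟩
    · rcases h4f with rfl | rfl
      · exact ⟨(v0, v4), Or.inr rfl, by rw [pvMem_ite_nil]; exact ⟨⟨e01, e02, e34, e24⟩, by simp [hx]⟩⟩
      · exact absurd rfl d40

-- flatMap over a nodup list is nodup when a key recovers the index
lemma pvNodup_flatMap_key {alpha : Type} (r : List alpha) (hr : r.Nodup) (f : alpha → List (List Int))
    (key : List Int → alpha) (hN : ∀ v ∈ r, (f v).Nodup)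
    (hk : ∀ v x, x ∈ f v → key x = v) : (r.flatMap f).Nodup := by
  rw [List.nodup_flatMap]
  refine ⟨hN, hr.imp ?_⟩
  intro a b hab x hx1 hx2
  exact absurd ((hk _ _ hx1).symm.trans (hk _ _ hx2)) hab

-- shape of the tuples produced at the innermost level
lemma pvShape3 (A : List (List Int)) (v1 v2 v3 : Int) (x : List Int)
    (hx : x ∈ pvT3 A v1 v2 v3) : ∃ v0 v4 : Int, x = [v0, v1, v2, v3, v4] := by
  unfold pvT3 at hx
  split at hx
  case isFalse => simp at hx
  case isTrue hg =>
    rcases hfe : ([0, 1, 2, 3, 4] : List Int).filter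
        (fun x => decide (x ≠ v1) && decide (x ≠ v2) && decide (x ≠ v3)) with
      _ | ⟨a, _ | ⟨b, _ | ⟨c, l⟩⟩⟩ <;> rw [hfe] at hx
    · simp at hx
    · simp at hx
    · simp only [List.mem_flatMap] at hx
      obtain ⟨p, _, hx⟩ := hx
      rw [pvMem_ite_nil] at hx
      obtain ⟨-, hx⟩ := hx
      simp only [List.mem_singleton] at hx
      exact ⟨p.1, p.2, hx⟩
    · simp at hx

lemma pvNodup3 (A : List (List Int)) (v1 v2 v3 : Int) : (pvT3 A v1 v2 v3).Nodup := by
  unfold pvT3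
  split
  case isFalse => simp
  case isTrue hg =>
    rcases hfe : ([0, 1, 2, 3, 4] : List Int).filter
        (fun x => decide (x ≠ v1) && decide (x ≠ v2) && decide (x ≠ v3)) with
      _ | ⟨a, _ | ⟨b, _ | ⟨c, l⟩⟩⟩
    · simp
    · simp
    · have hab : a ≠ b := by
        have := pvCompNodup v1 v2 v3
        rw [hfe] at this
        simp at this
        exact this
      refine pvNodup_flatMap_key _ (by simp [Prod.ext_iff]; exact fun h _ => hab h) _
        (fun x => (x.getD 0 0, x.getD 4 0)) (fun p _ => ?_) (fun p x hx => ?_)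
      · split <;> simp
      · rw [pvMem_ite_nil] at hx
        obtain ⟨-, hx⟩ := hx
        simp only [List.mem_singleton] at hx
        subst hx
        rfl
    · simp

lemma pvNodup2 (A : List (List Int)) (v1 v2 : Int) : (pvT2 A v1 v2).Nodup := by
  unfold pvT2
  refine pvNodup_flatMap_key _ (by decide) _ (fun x => x.getD 3 0)
    (fun v _ => pvNodup3 A v1 v2 v) (fun v x hx => ?_)
  obtain ⟨v0, v4, hx⟩ := pvShape3 A v1 v2 v x hx
  subst hx
  rfl

lemma pvShape2 (A : List (List Int)) (v1 v2 : Int) (x : List Int)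
    (hx : x ∈ pvT2 A v1 v2) : ∃ v0 v3 v4 : Int, x = [v0, v1, v2, v3, v4] := by
  unfold pvT2 at hx
  simp only [List.mem_flatMap] at hx
  obtain ⟨v3, -, hx⟩ := hx
  obtain ⟨v0, v4, hx⟩ := pvShape3 A v1 v2 v3 x hx
  exact ⟨v0, v3, v4, hx⟩

lemma pvNodup1 (A : List (List Int)) (v1 : Int) : (pvT1 A v1).Nodup := by
  unfold pvT1
  refine pvNodup_flatMap_key _ (by decide) _ (fun x => x.getD 2 0)
    (fun v _ => pvNodup2 A v1 v) (fun v x hx => ?_)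
  obtain ⟨v0, v3, v4, hx⟩ := pvShape2 A v1 v x hx
  subst hx
  rfl

lemma pvShape1 (A : List (List Int)) (v1 : Int) (x : List Int)
    (hx : x ∈ pvT1 A v1) : ∃ v0 v2 v3 v4 : Int, x = [v0, v1, v2, v3, v4] := by
  unfold pvT1 at hx
  simp only [List.mem_flatMap] at hx
  obtain ⟨v2, -, hx⟩ := hx
  obtain ⟨v0, v3, v4, hx⟩ := pvShape2 A v1 v2 x hx
  exact ⟨v0, v2, v3, v4, hx⟩

lemma pvNodupT (A : List (List Int)) : (pvT A).Nodup := by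
  unfold pvT
  refine pvNodup_flatMap_key _ (by decide) _ (fun x => x.getD 1 0)
    (fun v _ => pvNodup1 A v) (fun v x hx => ?_)
  obtain ⟨v0, v2, v3, v4, hx⟩ := pvShape1 A v x hx
  subst hx
  rfl

lemma pvMain (A : List (List Int)) : omega4_local A = omega4_local_alt A := by
  rw [pvAlt_eq]
  unfold omega4_local
  rw [pvFoldl_count]
  have hperm : List.Perm ((([0, 1, 2, 3, 4] : List Int).permutations).filter (pvCondA A)) (pvT A) := by
    refine (List.perm_ext_iff_of_nodup ?_ (pvNodupT A)).mpr
      (fun x => (pvMemA A x).trans (pvMemB A x).symm)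
    exact (List.nodup_permutations _ (by decide)).filter _
  rw [hperm.length_eq]
  ring

-- ===== VERDICT (by name: the statement is the Claim_ definition above) =====
theorem omega4_local_spec : Claim_equal_omega4_local := by
  intro A _ _
  unfold Spec_omega4_local
  exact pvMain A
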